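-- pv_equiv track=rewrite | github.com/AydroPunk/Proyecto_1-EDA-II | Programas/PP1P3.py | ordenamientoF
-- ===== SOURCE A (Python) =====
-- def orden(A): # Muestro el orden de aparición de los elementos
--     B = []
--     for i in range(len(A)):
--         if A[i] not in B:
--             B.append(A[i])
--     return B
--
-- def ordenamientoF(A): # A es la lista y k es el valor máximo de la lista
--     O = orden(A)
--     F = [] # Matriz que almacena la frecuencia de aparición  de cada elemento
--     for i in range(len(O)):
--         conta = 0
--         for j in range(len(A)):
--             if O[i] == A[j]:
--                 conta += 1
--         F.append(conta)
--     A = []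
--     for i in range(len(F)):
--         mayor = max(F)
--         # En caso de repetirse, se almacena en orden los elementos que tienen a 2
--         for j in range(len(F)):
--             if F[j] == mayor:
--                 A.extend([O[j]] * mayor)
--                 F[j] = 0
--     return A
-- ===== SOURCE B (Python) =====
-- def ordenamientoF(A):
--     # Count frequencies in first-appearance order, then emit buckets by
--     # descending frequency value instead of repeated max-scan + zeroing.
--     freq = {}
--     for x in A:
--         freq[x] = freq.get(x, 0) + 1
--     out = []
--     for f in range(max(freq.values(), default=0), 0, -1):
--         for x, c in freq.items():
--             if c == f:
--                 out.extend([x] * f)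
--     return out
-- ===== Notes on version B (the rewrite author's own statement) =====
-- stated objective: faster
-- what changed: Replaces A's nested counting loops and quadratic repeated max-scan-and-zero selection over the frequency array with a single dict counting pass followed by one descending sweep over frequency values that emits each bucket in appearance order.
import Mathlib
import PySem

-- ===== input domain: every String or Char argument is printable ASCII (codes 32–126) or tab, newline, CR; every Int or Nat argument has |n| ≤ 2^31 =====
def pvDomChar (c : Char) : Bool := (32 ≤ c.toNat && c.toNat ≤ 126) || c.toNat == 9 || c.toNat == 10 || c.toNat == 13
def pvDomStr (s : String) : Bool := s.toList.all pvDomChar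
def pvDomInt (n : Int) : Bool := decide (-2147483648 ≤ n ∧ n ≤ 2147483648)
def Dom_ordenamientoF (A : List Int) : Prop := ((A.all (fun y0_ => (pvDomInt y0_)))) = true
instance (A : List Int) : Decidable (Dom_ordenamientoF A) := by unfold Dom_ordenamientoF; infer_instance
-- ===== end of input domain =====

-- B replaces A's quadratic repeated max-scan-and-zero selection over the frequency
-- array by one dict counting pass plus a descending sweep over frequency values.

-- ===== PORT A =====
-- inner 'for j in range(len(F))' of the selection loop: reads F[j], O[j], sets F[j]=0 on match
def selInner (mayor : Int) : List Int → List Int → List Int × List Int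
  | f :: fs, o :: os =>
      let r := selInner mayor fs os
      if f == mayor then (0 :: r.1, List.replicate mayor.toNat o ++ r.2)
      else (f :: r.1, r.2)
  | fs, _ => (fs, [])

-- outer 'for i in range(len(F))': n remaining iterations over mutable F (max(F) only read with F nonempty)
def selLoop (O : List Int) : Nat → List Int → List Int
  | 0, _ => []
  | n+1, F =>
      let mayor := (PySem.List.max? F (fun v => v)).getD 0
      let r := selInner mayor F O
      r.2 ++ selLoop O n r.1

def ordenamientoF (A : List Int) : List Int :=
  let O := A.foldl (fun B x => if PySem.Set.contains B x then B else B ++ [x]) []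
  let F := O.foldl (fun F o => F ++ [A.foldl (fun conta y => if o == y then conta + 1 else conta) 0]) []
  selLoop O F.length F

-- ===== PORT B =====
def ordenamientoF_alt (A : List Int) : List Int :=
  let freq : PySem.Dict Int Int := A.foldl (fun d x => d.modify x 0 (· + 1)) PySem.Dict.empty
  let M := (PySem.List.max? freq.values (fun v => v)).getD 0
  (PySem.List.pyRange M 0 (-1)).foldl (fun out f =>
    freq.items.foldl (fun out p => if p.2 == f then out ++ List.replicate f.toNat p.1 else out) out) []

-- ===== PRECONDITION & SPEC =====
def Spec_ordenamientoF (A : List Int) (out : List Int) : Prop := out = ordenamientoF_alt A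
instance (A : List Int) (out : List Int) : Decidable (Spec_ordenamientoF A out) := by unfold Spec_ordenamientoF; infer_instance

-- ===== CLAIM (what is proved, stated in full; the proofs are below) =====
def Claim_equal_ordenamientoF : Prop := ∀ (A : List Int), Dom_ordenamientoF A → Spec_ordenamientoF A (ordenamientoF A)

-- ===== LEMMAS AND PROOFS =====

-- zero-out step applied to one frequency entry
def zf (m c : Int) : Int := if c = m then 0 else c

-- contribution of one frequency level f over (count, element) pairs
def level (f : Int) (P : List (Int × Int)) : List Int :=
  P.flatMap (fun p => if p.1 = f then List.replicate f.toNat p.2 else [])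

-- the descending list [k, k-1, …, 1]
def descN : Nat → List Int
  | 0 => []
  | k+1 => ((k : Int) + 1) :: descN k

-- number of distinct nonzero values in F
def dcountF (F : List Int) : Nat := (F.toFinset.erase 0).card

theorem selInner_snd (m : Int) (F O : List Int) :
    (selInner m F O).2 = level m (F.zip O) := by
  induction F generalizing O with
  | nil => simp [selInner, level]
  | cons f fs ih =>
      cases O with
      | nil => simp [selInner, level]
      | cons o os =>
          simp only [selInner, level, List.zip_cons_cons, List.flatMap_cons]
          by_cases h : f = m <;> simp [h, level] at ih ⊢ <;> simp [ih]

theorem selInner_fst (m : Int) (F O : List Int) (h : F.length ≤ O.length) :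
    (selInner m F O).1 = F.map (zf m) := by
  induction F generalizing O with
  | nil => simp [selInner]
  | cons f fs ih =>
      cases O with
      | nil => simp at h
      | cons o os =>
          simp only [List.length_cons, Nat.add_le_add_iff_right] at h
          simp only [selInner, List.map_cons]
          by_cases hf : f = m <;> simp [hf, zf, ih os h]

theorem mem_descN (f : Int) (k : Nat) : f ∈ descN k ↔ 1 ≤ f ∧ f ≤ (k : Int) := by
  induction k with
  | zero => simp [descN]; omega
  | succ k ih => simp [descN, ih]; omega

theorem max_getD_mem (F : List Int) (h : F ≠ []) :
    (PySem.List.max? F (fun v => v)).getD 0 ∈ F ∧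
      ∀ c ∈ F, c ≤ (PySem.List.max? F (fun v => v)).getD 0 := by
  cases hm : PySem.List.max? F (fun v => v) with
  | none => exact absurd ((PySem.List.max?_eq_none_iff F (fun v => v)).mp hm) h
  | some m =>
      refine ⟨?_, ?_⟩
      · simpa using PySem.List.max?_mem hm
      · intro c hc; simpa using PySem.List.max?_isMax hm c hc

theorem max_getD_zero (F : List Int) (h : ∀ c ∈ F, c = 0) :
    (PySem.List.max? F (fun v => v)).getD 0 = 0 := by
  cases F with
  | nil => simp [PySem.List.max?]
  | cons a t =>
      have h1 := (max_getD_mem (a :: t) (by simp)).1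
      exact h _ h1

theorem level_nil_of_ne (f : Int) (F O : List Int) (h : ∀ c ∈ F, c ≠ f) :
    level f (F.zip O) = [] := by
  simp only [level, List.flatMap_eq_nil_iff]
  intro p hp
  have := List.of_mem_zip hp
  simp [h p.1 this.1]

theorem selLoop_zero (O : List Int) (n : Nat) (F : List Int)
    (hlen : F.length ≤ O.length) (h : ∀ c ∈ F, c = 0) :
    selLoop O n F = [] := by
  induction n generalizing F with
  | zero => simp [selLoop]
  | succ n ih =>
      have hmax := max_getD_zero F h
      simp only [selLoop, hmax]
      rw [selInner_snd, selInner_fst _ _ _ hlen]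
      have h2 : level 0 (F.zip O) = [] := by
        simp only [level, List.flatMap_eq_nil_iff]
        intro p hp
        have := List.of_mem_zip hp
        simp [h p.1 this.1]
      rw [h2]
      have : ∀ c ∈ F.map (zf 0), c = 0 := by
        intro c hc
        obtain ⟨x, hx, rfl⟩ := List.mem_map.mp hc
        simp [zf, h x hx]
      simpa using ih (F.map (zf 0)) (by simpa using hlen) this

theorem flatMap_congr_mem {α β : Type} (l : List α) (g g' : α → List β)
    (h : ∀ x ∈ l, g x = g' x) : l.flatMap g = l.flatMap g' := by
  induction l with
  | nil => simp
  | cons a t ih =>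
      simp only [List.flatMap_cons]
      rw [h a (List.mem_cons_self ..), ih (fun x hx => h x (List.mem_cons_of_mem _ hx))]

theorem flatMap_fun_congr {α β : Type} (l : List α) (g g' : α → List β)
    (h : ∀ p, g p = g' p) : l.flatMap g = l.flatMap g' := by
  have : g = g' := funext h
  rw [this]

theorem level_zf (f m : Int) (hf0 : f ≠ 0) (hfm : f ≠ m) (F O : List Int) :
    level f ((F.map (zf m)).zip O) = level f (F.zip O) := by
  rw [List.zip_map_left, level, List.flatMap_map]
  refine flatMap_fun_congr _ _ _ ?_
  rintro ⟨c, o⟩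
  by_cases hc : c = m <;> simp [zf, hc, Ne.symm hfm, Ne.symm hf0]

theorem dcountF_le_length (F : List Int) : dcountF F ≤ F.length :=
  le_trans (Finset.card_le_card (Finset.erase_subset _ _)) F.toFinset_card_le

theorem dcountF_map_zf (F : List Int) (m : Int) (hm : m ∈ F) (hm0 : m ≠ 0) :
    dcountF (F.map (zf m)) + 1 = dcountF F := by
  have hset : ((F.map (zf m)).toFinset.erase 0) = (F.toFinset.erase 0).erase m := by
    ext a
    simp only [Finset.mem_erase, List.mem_toFinset, List.mem_map]
    constructor
    · rintro ⟨ha0, x, hx, rfl⟩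
      unfold zf at *
      split_ifs at ha0 ⊢ with h
      · simp at ha0
      · exact ⟨h, ha0, hx⟩
    · rintro ⟨ham, ha0, ha⟩
      exact ⟨ha0, a, ha, by simp [zf, ham]⟩
  have hmem : m ∈ F.toFinset.erase 0 := by
    simp [List.mem_toFinset.mpr hm, hm0]
  unfold dcountF
  rw [hset, Finset.card_erase_of_mem hmem]
  have : 0 < (F.toFinset.erase 0).card := Finset.card_pos.mpr ⟨m, hmem⟩
  omega

theorem selLoop_main (M' : Nat) : ∀ (F O : List Int) (n : Nat),
    F.length ≤ O.length → (∀ c ∈ F, 0 ≤ c) → (∀ c ∈ F, c ≤ (M' : Int)) →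
    dcountF F ≤ n →
    selLoop O n F = (descN M').flatMap (fun f => level f (F.zip O)) := by
  induction M' with
  | zero =>
      intro F O n hlen h0 hub _
      rw [selLoop_zero O n F hlen (fun c hc => le_antisymm (by exact_mod_cast hub c hc) (h0 c hc))]
      simp [descN]
  | succ M' ih =>
      intro F O n hlen h0 hub hd
      by_cases hF : F = []
      · subst hF
        rw [selLoop_zero O n [] (by simp) (by simp)]
        simp [level]
      · obtain ⟨hmem, hmax⟩ := max_getD_mem F hF
        set m := (PySem.List.max? F (fun v => v)).getD 0 with hmdef
        by_cases hm0 : m = 0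
        · rw [selLoop_zero O n F hlen
            (fun c hc => le_antisymm (hm0 ▸ hmax c hc) (h0 c hc))]
          symm
          simp only [List.flatMap_eq_nil_iff]
          intro f hf
          have hf1 := (mem_descN f (M'+1)).mp hf
          exact level_nil_of_ne f F O
            (fun c hc => by have := hmax c hc; have := h0 c hc; omega)
        · have hm1 : 1 ≤ m := lt_of_le_of_ne (h0 m hmem) (Ne.symm hm0)
          by_cases hlt : m ≤ (M' : Int)
          · -- current max below the leading level: that level is empty
            have : selLoop O n F = (descN M').flatMap (fun f => level f (F.zip O)) :=
              ih F O n hlen h0 (fun c hc => le_trans (hmax c hc) hlt) hd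
            rw [this]
            have hnil : level ((M' : Int) + 1) (F.zip O) = [] :=
              level_nil_of_ne _ F O (fun c hc => by have := le_trans (hmax c hc) hlt; omega)
            simp [descN, hnil]
          · have hmeq : m = (M' : Int) + 1 := le_antisymm (by exact_mod_cast hub m hmem) (by omega)
            have hd1 : 1 ≤ dcountF F := by
              have : m ∈ F.toFinset.erase 0 := by simp [List.mem_toFinset.mpr hmem, hm0]
              exact Finset.card_pos.mpr ⟨m, this⟩
            obtain ⟨n', rfl⟩ : ∃ n', n = n' + 1 := ⟨n - 1, by omega⟩
            simp only [selLoop, ← hmdef]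
            rw [selInner_snd, selInner_fst _ _ _ hlen]
            have ihF : selLoop O n' (F.map (zf m)) =
                (descN M').flatMap (fun f => level f ((F.map (zf m)).zip O)) := by
              refine ih (F.map (zf m)) O n' (by simpa using hlen) ?_ ?_ ?_
              · intro c hc
                obtain ⟨x, hx, rfl⟩ := List.mem_map.mp hc
                unfold zf; split_ifs with h
                · omega
                · exact h0 x hx
              · intro c hc
                obtain ⟨x, hx, rfl⟩ := List.mem_map.mp hc
                have := hmax x hx
                unfold zf; split_ifs with h
                · omega
                · omega
              · have := dcountF_map_zf F m hmem hm0
                omega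
            rw [ihF]
            have hlev : ∀ f ∈ descN M',
                level f ((F.map (zf m)).zip O) = level f (F.zip O) := by
              intro f hf
              have hf1 := (mem_descN f M').mp hf
              exact level_zf f m (by omega) (by omega) F O
            rw [flatMap_congr_mem (descN M') _ _ hlev]
            simp [descN, ← hmeq]

-- conditional extend loop is a flatMap
theorem foldl_cond_extend {α β : Type} (l : List α) (p : α → Bool) (g : α → List β)
    (acc : List β) :
    l.foldl (fun acc x => if p x then acc ++ g x else acc) acc =
      acc ++ l.flatMap (fun x => if p x then g x else []) := by
  induction l generalizing acc with
  | nil => simp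
  | cons a t ih => by_cases h : p a <;> simp [h, ih]

theorem descN_eq_range (n : Nat) :
    List.map (fun k : Nat => ((n : Int) - (k : Int))) (List.range n) = descN n := by
  induction n with
  | zero => simp [descN]
  | succ n ih =>
      rw [List.range_succ_eq_map]
      simp only [List.map_cons, List.map_map, descN]
      refine List.cons_eq_cons.mpr ⟨by push_cast; ring, ?_⟩
      rw [← ih]
      refine List.map_congr_left ?_
      intro k hk
      simp only [Function.comp_apply]
      push_cast; ring

theorem pyRange_desc (M : Int) (hM : 0 ≤ M) :
    PySem.List.pyRange M 0 (-1) = descN M.toNat := by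
  rw [PySem.List.pyRange_neg_one]
  simp only [sub_zero]
  rw [← descN_eq_range M.toNat]
  refine List.map_congr_left ?_
  intro k hk
  omega

theorem zip_map_cnt (cnt : Int → Int) (O : List Int) :
    (O.map cnt).zip O = O.map (fun o => (cnt o, o)) := by
  induction O with
  | nil => simp
  | cons o t ih => simp [ih]

theorem count_foldl (A : List Int) (o : Int) :
    A.foldl (fun conta y => if o == y then conta + 1 else conta) 0 = (A.count o : Int) := by
  have h : (fun (conta : Int) (y : Int) => if o == y then conta + 1 else conta)
       = (fun (conta : Int) (y : Int) => if y == o then conta + 1 else conta) := by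
    funext c y
    by_cases h : y = o
    · simp [h]
    · simp [beq_iff_eq, h, Ne.symm h]
  rw [h, PySem.List.foldl_beq_add_one]
  simp

-- assembly: both reduced forms agree, for an arbitrary nonnegative count function
theorem assemble (O : List Int) (cnt : Int → Int) (hpos : ∀ o, 0 ≤ cnt o) :
    selLoop O (List.map cnt O).length (List.map cnt O) =
      List.foldl
        (fun out f =>
          List.foldl (fun out p => if (p.2 == f) = true then out ++ List.replicate f.toNat p.1 else out) out
            (List.map (fun k => (k, cnt k)) O))
        []
        (PySem.List.pyRange ((PySem.List.max? (List.map cnt O) (fun v => v)).getD 0) 0 (-1)) := by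
  set C := List.map cnt O with hC
  set M : Int := (PySem.List.max? C fun v => v).getD 0 with hM
  have hM0 : 0 ≤ M := by
    rcases hm : PySem.List.max? C fun v => v with _ | m
    · simp [hM, hm]
    · have hmem := PySem.List.max?_mem hm
      rw [hC] at hmem
      obtain ⟨o, _, rfl⟩ := List.mem_map.mp hmem
      simp [hM, hm, hpos o]
  have h0 : ∀ c ∈ C, 0 ≤ c := by
    intro c hc; rw [hC] at hc
    obtain ⟨o, _, rfl⟩ := List.mem_map.mp hc
    exact hpos o
  have hub : ∀ c ∈ C, c ≤ ((M.toNat : Nat) : Int) := by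
    intro c hc
    rw [Int.toNat_of_nonneg hM0]
    rcases hm : PySem.List.max? C fun v => v with _ | m
    · rw [(PySem.List.max?_eq_none_iff C (fun v => v)).mp hm] at hc
      simp at hc
    · have h := PySem.List.max?_isMax hm c hc
      simpa [hM, hm] using h
  have hlen : C.length ≤ O.length := by simp [hC]
  rw [selLoop_main M.toNat C O C.length hlen h0 hub (dcountF_le_length C)]
  rw [show (fun (out : List Int) (f : Int) =>
        List.foldl (fun out p => if (p.2 == f) = true then out ++ List.replicate f.toNat p.1 else out) out
          (List.map (fun k => (k, cnt k)) O))
      = (fun (out : List Int) (f : Int) => out ++ (List.map (fun k => (k, cnt k)) O).flatMap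
            (fun p => if (p.2 == f) = true then List.replicate f.toNat p.1 else [])) from
      funext fun out => funext fun f => foldl_cond_extend _ _ _ _]
  rw [PySem.List.foldl_append_eq_flatMap]
  simp only [List.nil_append]
  rw [pyRange_desc M hM0]
  refine flatMap_congr_mem _ _ _ ?_
  intro f _
  rw [hC, level, zip_map_cnt cnt O, List.flatMap_map, List.flatMap_map]
  refine flatMap_fun_congr _ _ _ ?_
  intro o
  by_cases h : cnt o = f <;> simp [h]

-- ===== VERDICT (by name: the statement is the Claim_ definition above) =====
theorem ordenamientoF_spec : Claim_equal_ordenamientoF := by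
  intro A _
  unfold Spec_ordenamientoF
  simp only [ordenamientoF, ordenamientoF_alt]
  rw [show (A.foldl (fun B x => if PySem.Set.contains B x then B else B ++ [x]) [])
       = PySem.Set.ofList A from by rw [PySem.Set.ofList_eq_foldl]; rfl]
  rw [PySem.List.foldl_append_singleton_eq_map
        (fun o => A.foldl (fun conta y => if o == y then conta + 1 else conta) 0)]
  simp only [List.nil_append]
  rw [List.map_congr_left (fun o _ => count_foldl A o)]
  rw [show (A.foldl (fun d x => d.modify x 0 (· + 1)) PySem.Dict.empty)
       = PySem.Dict.counter A from (PySem.Dict.counter_eq_foldl A).symm]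
  simp only [PySem.Dict.values, PySem.Dict.items_counter, List.map_map]
  exact assemble (PySem.Set.ofList A) (fun o => ((List.count o A : Nat) : Int))
    (fun o => by positivity)
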